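-- pv_equiv track=rewrite | github.com/alexandraback/datacollection | solutions_5631572862566400_1/Python/halucinka/C.py | spracujKomponent
-- ===== SOURCE A (Python) =====
-- def spracujKomponent(komponent):
--     c = {}
--     for dlzka_chvosta, dlzka_cyklu, ID, vstup_do_cyklu in komponent:
--         if vstup_do_cyklu not in c:
--             c[vstup_do_cyklu] = dlzka_chvosta
--         else:
--             c[vstup_do_cyklu] = max(c[vstup_do_cyklu], dlzka_chvosta)
--     sucet = 0
--     for chvost in c.values():
--         sucet += chvost
--     return sucet + 2
-- ===== SOURCE B (Python) =====
-- def _suma(komponent):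
--     if not komponent:
--         return 0
--     k = komponent[0][3]
--     best = max(v for v, _, _, kk in komponent if kk == k)
--     rest = [t for t in komponent if t[3] != k]
--     return best + _suma(rest)
--
-- def spracujKomponent(komponent):
--     return _suma(komponent) + 2
-- ===== Notes on version B (the rewrite author's own statement) =====
-- stated objective: alternative
-- what changed: B drops the dict entirely: it recursively partitions the list by the first tuple's cycle-entry key, reduces that whole group to its max by a scan, removes the group and recurses on the remainder (recursive divide-by-key instead of a hash-accumulator pass plus a values loop).
import Mathlib
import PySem

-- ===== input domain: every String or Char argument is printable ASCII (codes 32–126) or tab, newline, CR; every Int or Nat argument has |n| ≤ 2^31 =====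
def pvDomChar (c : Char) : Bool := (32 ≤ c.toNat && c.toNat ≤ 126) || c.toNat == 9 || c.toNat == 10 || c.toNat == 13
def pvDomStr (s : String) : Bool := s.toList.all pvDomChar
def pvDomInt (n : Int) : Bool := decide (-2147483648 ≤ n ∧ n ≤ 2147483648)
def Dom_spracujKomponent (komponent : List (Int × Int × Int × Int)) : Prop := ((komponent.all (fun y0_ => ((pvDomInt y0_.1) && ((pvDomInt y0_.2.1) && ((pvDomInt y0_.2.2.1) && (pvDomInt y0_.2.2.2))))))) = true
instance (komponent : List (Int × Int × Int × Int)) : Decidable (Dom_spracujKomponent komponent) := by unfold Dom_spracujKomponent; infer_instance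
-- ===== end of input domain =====

-- B replaces A's dict of running maxima by a recursive partition with no dict at all:
-- take the first tuple's cycle-entry key, reduce that whole group to its max by a scan,
-- remove the group and recurse on the remainder (objective: alternative).

-- ===== PORT A =====
-- loop body of A's first loop: c[k] = v if k not in c else max(c[k], v)
def pvStepA (c : PySem.Dict Int Int) (q : Int × Int × Int × Int) : PySem.Dict Int Int :=
  if c.contains q.2.2.2 = false then c.insert q.2.2.2 q.1
  else c.insert q.2.2.2 (max (c.getD q.2.2.2 0) q.1)   -- c[k] exists here, getD's default is never used

def spracujKomponent (komponent : List (Int × Int × Int × Int)) : Int :=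
  let c := komponent.foldl pvStepA PySem.Dict.empty
  let sucet := c.values.foldl (fun s chvost => s + chvost) 0
  sucet + 2

-- ===== PORT B =====
-- _suma of Source B: max of the first key's group plus the sum for the list with that group removed
def pvSuma (l : List (Int × Int × Int × Int)) : Int :=
  match l with
  | [] => 0
  | q :: t =>
    -- max(v for … if kk == k): the group contains q, so max? is some and the default 0 is never used
    (PySem.List.max? (((q :: t).filter (fun p => p.2.2.2 == q.2.2.2)).map (·.1)) id).getD 0
      + pvSuma ((q :: t).filter (fun p => p.2.2.2 != q.2.2.2))
  termination_by l.length
  decreasing_by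
    simp only [List.filter_cons, bne_self_eq_false, Bool.false_eq_true, if_false, List.length_cons]
    exact Nat.lt_succ_of_le (List.length_filter_le _ t)

def spracujKomponent_alt (komponent : List (Int × Int × Int × Int)) : Int :=
  pvSuma komponent + 2

-- ===== PRECONDITION & SPEC =====
def Spec_spracujKomponent (komponent : List (Int × Int × Int × Int)) (out : Int) : Prop := out = spracujKomponent_alt komponent
instance (komponent : List (Int × Int × Int × Int)) (out : Int) : Decidable (Spec_spracujKomponent komponent out) := by unfold Spec_spracujKomponent; infer_instance

-- ===== CLAIM (what is proved, stated in full; the proofs are below) =====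
def Claim_equal_spracujKomponent : Prop := ∀ (komponent : List (Int × Int × Int × Int)), Dom_spracujKomponent komponent → Spec_spracujKomponent komponent (spracujKomponent komponent)

-- ===== LEMMAS AND PROOFS =====

-- max of the dlzka_chvosta values whose key is c (0 if the group is empty)
def pvMaxGroup (l : List (Int × Int × Int × Int)) (c : Int) : Int :=
  (PySem.List.max? ((l.filter (fun q => q.2.2.2 == c)).map (·.1)) id).getD 0

-- A's step is an insert keyed by q.2.2.2 (lets the generic keys/Nodup lemmas apply)
theorem pvStepA_insert_form :
    pvStepA = fun c q => c.insert q.2.2.2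
      (if c.contains q.2.2.2 = false then q.1 else max (c.getD q.2.2.2 0) q.1) := by
  funext c q
  unfold pvStepA
  split_ifs <;> rfl

-- A's dict lookup at c: running max of the group of values whose key is c
theorem pvA_get? (l : List (Int × Int × Int × Int)) (c : Int) :
    ∀ d : PySem.Dict Int Int,
      (l.foldl pvStepA d).get? c =
        ((l.filter (fun q => q.2.2.2 == c)).map (·.1)).foldl
          (fun o v => some (match o with | none => v | some m => if m < v then v else m))
          (d.get? c) := by
  induction l with
  | nil => intro d; simp
  | cons q l ih =>
    intro d
    simp only [List.foldl_cons, ih, List.filter_cons]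
    by_cases hc : q.2.2.2 = c
    · subst hc
      simp only [beq_self_eq_true, if_pos, List.map_cons, List.foldl_cons]
      congr 1
      unfold pvStepA
      by_cases h : d.contains q.2.2.2 = false
      · rw [if_pos h, PySem.Dict.get?_insert_self]
        have : d.get? q.2.2.2 = none := by
          rw [PySem.Dict.get?_eq_none_iff_contains]; exact h
        rw [this]
      · rw [if_neg h, PySem.Dict.get?_insert_self]
        have hcon : d.contains q.2.2.2 = true := by
          cases hcb : d.contains q.2.2.2 with
          | false => exact absurd hcb h
          | true => rfl
        have hsome : (d.get? q.2.2.2).isSome := by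
          rw [← PySem.Dict.contains_eq_isSome_get?]; exact hcon
        obtain ⟨old, hold⟩ := Option.isSome_iff_exists.mp hsome
        rw [hold]
        have : d.getD q.2.2.2 0 = old := by
          rw [PySem.Dict.getD_eq_get?_getD, hold]; rfl
        rw [this]
        congr 1
        show max old q.1 = if old < q.1 then q.1 else old
        by_cases hlt : old < q.1
        · rw [if_pos hlt, max_eq_right hlt.le]
        · rw [if_neg hlt, max_eq_left (le_of_not_gt hlt)]
    · have hb : (q.2.2.2 == c) = false := beq_eq_false_iff_ne.mpr hc
      have hcc : c ≠ q.2.2.2 := fun h => hc h.symm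
      simp only [hb, Bool.false_eq_true, if_false]
      congr 1
      unfold pvStepA
      split_ifs <;> simp [PySem.Dict.get?_insert, hcc]

-- the running-max fold IS PySem.List.max? with identity key
theorem pvRunMax_eq_max? (vs : List Int) :
    vs.foldl (fun o v => some (match o with | none => v | some m => if m < v then v else m))
      (none : Option Int) = PySem.List.max? vs id := by
  unfold PySem.List.max?
  apply PySem.List.foldl_congr_mem
  intro o v _
  cases o <;> simp [id, apply_ite some]

-- A's stored value at key c is the max of c's group
theorem pvA_getD (l : List (Int × Int × Int × Int)) (c : Int) :
    (l.foldl pvStepA PySem.Dict.empty).getD c 0 = pvMaxGroup l c := by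
  rw [PySem.Dict.getD_eq_get?_getD, pvA_get? l c PySem.Dict.empty, PySem.Dict.get?_empty,
    pvRunMax_eq_max?]
  rfl

-- discard is a filter, and two filters commute
theorem pvDiscard_filter (p : Int → Bool) (s : List Int) (x : Int) :
    PySem.Set.discard (s.filter p) x = (PySem.Set.discard s x).filter p := by
  show (s.filter p).filter (fun y => y != x) = (s.filter (fun y => y != x)).filter p
  rw [List.filter_filter, List.filter_filter]
  exact List.filter_congr (fun y _ => Bool.and_comm _ _)

-- filtering by p already drops x when p x = false, so a prior discard of x is harmless
theorem pvFilter_discard (p : Int → Bool) (s : List Int) (x : Int) (hp : p x = false) :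
    (PySem.Set.discard s x).filter p = s.filter p := by
  show (s.filter (fun y => y != x)).filter p = s.filter p
  rw [List.filter_filter]
  apply List.filter_congr
  intro y _
  cases hpy : p y with
  | false => simp
  | true =>
    have hyx : y ≠ x := fun he => by rw [he, hp] at hpy; exact Bool.false_ne_true hpy
    simp [hyx]

-- set(xs) commutes with filter: first occurrences of the kept elements
theorem pvOfList_filter (p : Int → Bool) (xs : List Int) :
    PySem.Set.ofList (xs.filter p) = (PySem.Set.ofList xs).filter p := by
  induction xs with
  | nil => rfl
  | cons x xs ih =>
    rw [List.filter_cons, PySem.Set.ofList_cons]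
    cases hp : p x with
    | true =>
      rw [if_pos rfl, PySem.Set.ofList_cons, List.filter_cons, if_pos hp, ih, pvDiscard_filter]
    | false =>
      rw [if_neg Bool.false_ne_true, List.filter_cons, if_neg (by simp [hp]),
        pvFilter_discard p _ x hp, ih]

-- removing a whole key group from the list removes exactly that key from the key set
theorem pvKeys_rest (q : Int × Int × Int × Int) (t : List (Int × Int × Int × Int)) :
    PySem.Set.ofList ((q :: t).map (·.2.2.2)) =
      q.2.2.2 :: PySem.Set.ofList ((((q :: t).filter (fun p => p.2.2.2 != q.2.2.2)).map (·.2.2.2))) := by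
  rw [List.map_cons, PySem.Set.ofList_cons, List.filter_cons]
  simp only [bne_self_eq_false, Bool.false_eq_true, if_false]
  congr 1
  have hmf : (t.filter (fun p => p.2.2.2 != q.2.2.2)).map (·.2.2.2) =
      (t.map (·.2.2.2)).filter (fun y => y != q.2.2.2) := by
    rw [List.filter_map]; rfl
  rw [hmf, pvOfList_filter]
  rfl

-- groups of other keys are unchanged by removing key k's group
theorem pvMaxGroup_rest (l : List (Int × Int × Int × Int)) (k c : Int) (hck : c ≠ k) :
    pvMaxGroup (l.filter (fun p => p.2.2.2 != k)) c = pvMaxGroup l c := by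
  unfold pvMaxGroup
  rw [List.filter_filter]
  have h : l.filter (fun a => a.2.2.2 == c && a.2.2.2 != k) = l.filter (fun a => a.2.2.2 == c) := by
    apply List.filter_congr
    intro p _
    by_cases h : p.2.2.2 = c
    · simp [h, hck]
    · simp [beq_eq_false_iff_ne.mpr h]
  rw [h]

-- the per-key maxima summed over the distinct keys equal B's recursive partition sum
theorem pvG_eq_suma (l : List (Int × Int × Int × Int)) :
    (((PySem.Set.ofList (l.map (·.2.2.2))).map (pvMaxGroup l)).sum) = pvSuma l := by
  induction l using pvSuma.induct with
  | case1 => simp [pvSuma]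
  | case2 q t ih =>
    rw [pvKeys_rest q t, List.map_cons, List.sum_cons]
    rw [show pvSuma (q :: t) =
        pvMaxGroup (q :: t) q.2.2.2 + pvSuma ((q :: t).filter (fun p => p.2.2.2 != q.2.2.2))
      by rw [pvSuma]; rfl]
    congr 1
    rw [← ih]
    apply congrArg List.sum
    apply List.map_congr_left
    intro c hc
    have hne : c ≠ q.2.2.2 := by
      have := (PySem.Set.mem_ofList _ _).mp hc
      simp only [List.mem_map] at this
      obtain ⟨p, hp, hpc⟩ := this
      have := List.of_mem_filter hp
      subst hpc
      exact fun h => by simp [h] at this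
    exact (pvMaxGroup_rest (q :: t) q.2.2.2 c hne).symm

-- ===== VERDICT (by name: the statement is the Claim_ definition above) =====
theorem spracujKomponent_spec : Claim_equal_spracujKomponent := by
  intro l _
  unfold Spec_spracujKomponent spracujKomponent spracujKomponent_alt
  simp only []
  set dA := l.foldl pvStepA PySem.Dict.empty with hdA
  have hndA : dA.keys.Nodup := by
    rw [hdA, pvStepA_insert_form]
    exact PySem.Dict.nodup_keys_foldl_insert_key l (fun q => q.2.2.2) _ PySem.Dict.empty
      (by simp)
  have hkeys : dA.keys = PySem.Set.ofList (l.map (·.2.2.2)) := by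
    rw [hdA, pvStepA_insert_form]
    rw [PySem.Dict.keys_foldl_insert_key l (fun q => q.2.2.2)
      (fun c q => if c.contains q.2.2.2 = false then q.1 else max (c.getD q.2.2.2 0) q.1)
      PySem.Dict.empty]
    rfl
  rw [PySem.List.foldl_add dA.values (fun v => v) 0]
  rw [PySem.Dict.values_eq_map_keys dA hndA 0]
  have hmap : ((dA.keys.map (fun k => dA.getD k 0)).map (fun v => v)) = dA.keys.map (pvMaxGroup l) := by
    rw [List.map_id']
    apply List.map_congr_left
    intro c _
    exact hdA ▸ pvA_getD l c
  rw [hmap, hkeys, pvG_eq_suma, zero_add]
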